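-- pv_equiv track=rewrite | github.com/SagnikDev/Infytq-Programme-Codes | Data Structure/assignment_19.py | last_instance
-- ===== SOURCE A (Python) =====
-- def last_instance( num_list,  start,  end,  key):
--     if(key in num_list):
--         a=end
--         while(a>start):
--             if(num_list[a]==key):
--                 return a
--             a-=1
--     else:
--         return -1
-- ===== SOURCE B (Python) =====
-- def last_instance(num_list, start, end, key):
--     if key not in num_list:
--         return -1
--     result = None
--     for i in range(start + 1, end + 1):
--         if num_list[i] == key:
--             result = i
--     return result
-- ===== Notes on version B (the rewrite author's own statement) =====
-- stated objective: alternative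
-- what changed: Replaces the short-circuiting backward while-loop with a single forward pass over range(start+1, end+1) that keeps the best-so-far (last) matching index in an accumulator.
-- outside the precondition, e.g. on last_instance([5], -3, 0, 5): A returns 0, B raises IndexError; on last_instance([1, 2], 0, 5, 2): A raises IndexError, B raises IndexError
import Mathlib
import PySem

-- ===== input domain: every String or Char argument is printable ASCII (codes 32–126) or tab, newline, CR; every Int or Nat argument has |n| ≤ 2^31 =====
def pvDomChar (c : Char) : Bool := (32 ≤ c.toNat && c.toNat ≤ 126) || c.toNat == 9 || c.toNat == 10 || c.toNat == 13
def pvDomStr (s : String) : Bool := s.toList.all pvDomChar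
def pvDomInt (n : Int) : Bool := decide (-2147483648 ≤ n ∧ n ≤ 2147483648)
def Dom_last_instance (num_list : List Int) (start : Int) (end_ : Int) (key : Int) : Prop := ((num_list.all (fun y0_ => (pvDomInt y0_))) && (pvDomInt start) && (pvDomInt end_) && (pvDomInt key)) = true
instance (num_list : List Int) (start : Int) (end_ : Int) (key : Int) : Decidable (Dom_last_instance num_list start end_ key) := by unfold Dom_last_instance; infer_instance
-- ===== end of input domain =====

-- B replaces A's short-circuiting backward while-loop with one forward pass keeping the
-- best-so-far (last) matching index; same cost, alternative decomposition.

-- ===== PORT A =====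
-- the while-loop: a counts down from end_ while a > start; pyGet? none = IndexError (excluded by Pre_)
def lastA_go (num_list : List Int) (start : Int) (key : Int) (a : Int) : Option Int :=
  if h : start < a then
    match PySem.List.pyGet? num_list a with
    | none => none
    | some v => if v = key then some a else lastA_go num_list start key (a - 1)
  else none
termination_by (a - start).toNat
decreasing_by omega

def last_instance (num_list : List Int) (start : Int) (end_ : Int) (key : Int) : Option Int :=
  if num_list.contains key then
    lastA_go num_list start key end_
  else some (-1)

-- ===== PORT B =====
-- forward pass over range(start+1, end_+1) keeping the last matching index
-- (pyGet? none = IndexError in the Python; excluded by Pre_)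
def last_instance_alt (num_list : List Int) (start : Int) (end_ : Int) (key : Int) : Option Int :=
  if num_list.contains key then
    (PySem.List.pyRange (start + 1) (end_ + 1) 1).foldl
      (fun result i =>
        match PySem.List.pyGet? num_list i with
        | some v => if v = key then some i else result
        | none => result)
      none
  else some (-1)

-- ===== PRECONDITION & SPEC =====
-- Pre_ excludes ranges whose scan can reach an out-of-bounds index: there A usually raises
-- IndexError (B too), but when A finds the key before leaving bounds A returns while B's full
-- forward pass still raises, so those inputs are excluded as well.
def Pre_last_instance (num_list : List Int) (start : Int) (end_ : Int) (key : Int) : Prop :=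
  key ∉ num_list ∨ end_ ≤ start ∨
    (end_ < (num_list.length : Int) ∧ -(num_list.length : Int) ≤ start + 1)

instance (num_list : List Int) (start : Int) (end_ : Int) (key : Int) : Decidable (Pre_last_instance num_list start end_ key) := by unfold Pre_last_instance; infer_instance

def pvWitness_last_instance : List Int × Int × Int × Int := ([1, 2, 1, 3], 0, 3, 1)

def Spec_last_instance (num_list : List Int) (start : Int) (end_ : Int) (key : Int) (out : Option Int) : Prop := out = last_instance_alt num_list start end_ key

instance (num_list : List Int) (start : Int) (end_ : Int) (key : Int) (out : Option Int) : Decidable (Spec_last_instance num_list start end_ key out) := by unfold Spec_last_instance; infer_instance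

-- ===== CLAIM =====
def Claim_equal_last_instance : Prop := ∀ (num_list : List Int) (start : Int) (end_ : Int) (key : Int), Dom_last_instance num_list start end_ key → Pre_last_instance num_list start end_ key → Spec_last_instance num_list start end_ key (last_instance num_list start end_ key)

-- ===== LEMMAS AND PROOFS =====
-- A's backward early-return scan equals B's forward best-so-far fold, provided every
-- index in (start, a] is in range.
lemma lastA_go_eq_foldl (num_list : List Int) (start key : Int) (a : Int)
    (H : ∀ i : Int, start < i → i ≤ a → (PySem.List.pyGet? num_list i).isSome) :
    lastA_go num_list start key a =
      (PySem.List.pyRange (start + 1) (a + 1) 1).foldl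
        (fun result i =>
          match PySem.List.pyGet? num_list i with
          | some v => if v = key then some i else result
          | none => result)
        none := by
  by_cases h : start < a
  · rw [PySem.List.pyRange_one_succ_right (by omega)]
    rw [List.foldl_append]
    obtain ⟨v, hv⟩ := Option.isSome_iff_exists.mp (H a h le_rfl)
    rw [lastA_go]
    simp only [h, dif_pos, hv, List.foldl_cons, List.foldl_nil]
    rw [lastA_go_eq_foldl num_list start key (a - 1)
      (fun i hi hia => H i hi (by omega))]
    have : a - 1 + 1 = a := by ring
    rw [this]
  · rw [lastA_go]
    simp only [h, dif_neg, not_false_iff]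
    rw [PySem.List.pyRange_one_eq_nil (by omega)]
    simp
termination_by (a - start).toNat
decreasing_by omega

theorem last_instance_spec_aux (num_list : List Int) (start end_ key : Int)
    (hpre : Pre_last_instance num_list start end_ key) :
    last_instance num_list start end_ key = last_instance_alt num_list start end_ key := by
  unfold last_instance last_instance_alt
  by_cases hc : num_list.contains key
  · rw [if_pos hc, if_pos hc]
    rcases hpre with hk | hle | ⟨h1, h2⟩
    · exact absurd (List.contains_iff_mem.mp hc) hk
    · rw [lastA_go]
      simp only [dif_neg (by omega : ¬ start < end_)]
      rw [PySem.List.pyRange_one_eq_nil (by omega)]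
      simp
    · refine lastA_go_eq_foldl num_list start key end_ (fun i hi hia => ?_)
      have : ¬ PySem.List.pyGet? num_list i = none := by
        rw [PySem.List.pyGet?_eq_none_iff]
        intro hnot
        exact hnot ⟨by omega, by omega⟩
      exact Option.isSome_iff_ne_none.mpr this
  · rw [if_neg hc, if_neg hc]

-- ===== VERDICT =====
theorem last_instance_spec : Claim_equal_last_instance := by
  intro num_list start end_ key _ hpre
  exact last_instance_spec_aux num_list start end_ key hpre
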